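-- pv_equiv track=rewrite | github.com/jetpham/Advent-Of-Code-2023 | Day1/Day1.py | trebuchet
-- ===== SOURCE A (Python) =====
-- from typing import List
--
-- def trebuchet(noisyValues: List[str]) -> int:
--     total = 0
--     valid = {
--         "one": 1,
--         "two": 2,
--         "three": 3,
--         "four": 4,
--         "five": 5,
--         "six": 6,
--         "seven": 7,
--         "eight": 8,
--         "nine": 9,
--         "1": 1,
--         "2": 2,
--         "3": 3,
--         "4": 4,
--         "5": 5,
--         "6": 6,
--         "7": 7,
--         "8": 8,
--         "9": 9
--     }
--     for string in noisyValues: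
--         values = []
--         i = 0
--         while i < len(string):
--             for key in valid:
--                 if string[i:].startswith(key):
--                     values.append(valid[key])
--                     i += len(key)
--                     break
--             else:
--                 i += 1
--         total += values[0] * 10 + values[-1]
--     return total
-- ===== SOURCE B (Python) =====
-- from typing import List
--
-- _VALID = {
--     "one": 1, "two": 2, "three": 3, "four": 4, "five": 5,
--     "six": 6, "seven": 7, "eight": 8, "nine": 9,
--     "1": 1, "2": 2, "3": 3, "4": 4, "5": 5, "6": 6, "7": 7, "8": 8, "9": 9,
-- }
--
-- # Prefix trie over the 18 tokens, built once: dict-of-dicts, value stored under None.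
-- _TRIE = {}
-- for _w, _v in _VALID.items():
--     _node = _TRIE
--     for _c in _w:
--         _node = _node.setdefault(_c, {})
--     _node[None] = _v
--
--
-- def _walk(s, i):
--     """Follow the trie from position i as far as the characters allow.
--     Returns (value at the stop node or None, number of characters consumed)."""
--     node = _TRIE
--     k = 0
--     while i + k < len(s) and s[i + k] in node:
--         node = node[s[i + k]]
--         k += 1
--     return node.get(None), k
--
--
-- def trebuchet(noisyValues: List[str]) -> int:
--     total = 0
--     for s in noisyValues:
--         first = last = None
--         i = 0
--         while i < len(s):
--             v, k = _walk(s, i)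
--             if v is None:
--                 i += 1
--             else:
--                 if first is None:
--                     first = v
--                 last = v
--                 i += k
--         total += first * 10 + last
--     return total
-- ===== Notes on version B (the rewrite author's own statement) =====
-- stated objective: alternative
-- what changed: B builds a prefix trie (dict-of-dicts) over the 18 tokens once and walks it from each position, keeping only the first and last token values, instead of A's per-position scan over all 18 dict keys with startswith and a full token list.
import Mathlib
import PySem

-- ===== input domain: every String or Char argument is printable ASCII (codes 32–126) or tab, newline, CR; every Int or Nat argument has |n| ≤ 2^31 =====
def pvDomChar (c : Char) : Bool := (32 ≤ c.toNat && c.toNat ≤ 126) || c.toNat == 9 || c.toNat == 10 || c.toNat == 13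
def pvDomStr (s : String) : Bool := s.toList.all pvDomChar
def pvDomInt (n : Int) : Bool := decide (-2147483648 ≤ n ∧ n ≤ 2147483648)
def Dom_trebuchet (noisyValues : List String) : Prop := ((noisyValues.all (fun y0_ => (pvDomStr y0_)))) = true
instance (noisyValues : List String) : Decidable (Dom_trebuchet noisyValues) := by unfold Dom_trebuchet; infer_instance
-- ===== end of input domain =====

-- B replaces A's 18-key-per-position dict scan by a prefix trie over the same 18 tokens,
-- walked once per position, keeping only the first/last token values (objective: alternative).
-- Both Pythons raise on a string containing no token; Pre_ excludes exactly those inputs.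

-- ===== PORT A =====
-- A's dict 'valid' in insertion order
def keysA : List (String × Int) :=
  [("one", 1), ("two", 2), ("three", 3), ("four", 4), ("five", 5), ("six", 6),
   ("seven", 7), ("eight", 8), ("nine", 9),
   ("1", 1), ("2", 2), ("3", 3), ("4", 4), ("5", 5), ("6", 6), ("7", 7), ("8", 8), ("9", 9)]

-- 'for key in valid: if string[i:].startswith(key)' — first matching key's value and length
def scanKeysA (ks : List (String × Int)) (cs : List Char) : Option (Int × Nat) :=
  match ks with
  | [] => none
  | (k, v) :: t => if k.toList.isPrefixOf cs then some (v, k.toList.length) else scanKeysA t cs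

-- the while-loop over i, represented by the suffix string[i:]; fuel = remaining length bounds the iterations
def loopA (fuel : Nat) (cs : List Char) (values : List Int) : List Int :=
  match fuel with
  | 0 => values
  | fuel + 1 =>
    match cs with
    | [] => values
    | c :: rest =>
      match scanKeysA keysA (c :: rest) with
      | some (v, k) => loopA fuel ((c :: rest).drop k) (values ++ [v])
      | none => loopA fuel rest values

def trebuchet (noisyValues : List String) : Int :=
  noisyValues.foldl
    (fun total s =>
      let values := loopA s.toList.length s.toList []
      -- values[0] / values[-1]: the IndexError on an empty token list is excluded by Pre_
      total + (PySem.List.pyGet? values 0).getD 0 * 10 + (PySem.List.pyGet? values (-1)).getD 0)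
    0

-- ===== PORT B =====
-- Source B builds _TRIE as a dict-of-dicts; such a nested dictionary cannot be typed directly in
-- Lean, so the SAME trie is laid out as a flat node table (index = node, root = 0): each node
-- carries its value (the entry Source B stores under the None key) and its child list in Source B's
-- insertion order. The walk below is step for step Source B's _walk.
def trieNodes : List (Option Int × List (Char × Nat)) :=
  [(none, [('o', 1), ('t', 4), ('f', 11), ('s', 18), ('e', 25), ('n', 30), ('1', 34), ('2', 35), ('3', 36), ('4', 37), ('5', 38), ('6', 39), ('7', 40), ('8', 41), ('9', 42)]),
   (none, [('n', 2)]),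
   (none, [('e', 3)]),
   (some 1, []),
   (none, [('w', 5), ('h', 7)]),
   (none, [('o', 6)]),
   (some 2, []),
   (none, [('r', 8)]),
   (none, [('e', 9)]),
   (none, [('e', 10)]),
   (some 3, []),
   (none, [('o', 12), ('i', 15)]),
   (none, [('u', 13)]),
   (none, [('r', 14)]),
   (some 4, []),
   (none, [('v', 16)]),
   (none, [('e', 17)]),
   (some 5, []),
   (none, [('i', 19), ('e', 21)]),
   (none, [('x', 20)]),
   (some 6, []),
   (none, [('v', 22)]),
   (none, [('e', 23)]),
   (none, [('n', 24)]),
   (some 7, []),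
   (none, [('i', 26)]),
   (none, [('g', 27)]),
   (none, [('h', 28)]),
   (none, [('t', 29)]),
   (some 8, []),
   (none, [('i', 31)]),
   (none, [('n', 32)]),
   (none, [('e', 33)]),
   (some 9, []),
   (some 1, []),
   (some 2, []),
   (some 3, []),
   (some 4, []),
   (some 5, []),
   (some 6, []),
   (some 7, []),
   (some 8, []),
   (some 9, [])]

def trieVal (i : Nat) : Option Int := (trieNodes.getD i (none, [])).1
def trieChild (i : Nat) (c : Char) : Option Nat := (trieNodes.getD i (none, [])).2.lookup c

-- Source B's _walk: follow the trie as far as the characters allow; return the value stored at the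
-- stop node and the number of characters consumed (Source B's counter k, accumulated through the
-- recursion: each recursive step is one iteration of the while loop)
def walkT (i : Nat) (cs : List Char) : Option Int × Nat :=
  match cs with
  | [] => (trieVal i, 0)
  | c :: rest =>
    match trieChild i c with
    | some j =>
      let r := walkT j rest
      (r.1, r.2 + 1)
    | none => (trieVal i, 0)

-- Source B's while loop over i, carrying only first/last; fuel = remaining length bounds the iterations
def loopB (fuel : Nat) (cs : List Char) (first last : Option Int) : Option Int × Option Int :=
  match fuel with
  | 0 => (first, last)
  | fuel + 1 =>
    match cs with
    | [] => (first, last)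
    | c :: rest =>
      match walkT 0 (c :: rest) with
      | (none, _) => loopB fuel rest first last
      | (some v, k) =>
        loopB fuel ((c :: rest).drop k)
          (match first with | none => some v | some f => some f) (some v)

def trebuchet_alt (noisyValues : List String) : Int :=
  noisyValues.foldl
    (fun total s =>
      let fl := loopB s.toList.length s.toList none none
      -- 'first * 10 + last': the TypeError on a token-free string is excluded by Pre_
      total + fl.1.getD 0 * 10 + fl.2.getD 0)
    0

-- ===== PRECONDITION & SPEC =====
-- the tokens as plain strings; used only by Pre_
def allTokenStrings : List String :=
  ["one", "two", "three", "four", "five", "six", "seven", "eight", "nine",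
   "1", "2", "3", "4", "5", "6", "7", "8", "9"]

-- Pre_ excludes exactly the inputs on which the Python A raises (IndexError on a string that
-- contains no digit 1-9 and no spelled-out digit word): every string must contain some token.
def Pre_trebuchet (noisyValues : List String) : Prop :=
  ∀ s ∈ noisyValues, ∃ k ∈ allTokenStrings, k.toList <:+: s.toList

instance (noisyValues : List String) : Decidable (Pre_trebuchet noisyValues) := by
  unfold Pre_trebuchet; infer_instance

def pvWitness_trebuchet : List String := ["two1nine", "xoneightx"]

def Spec_trebuchet (noisyValues : List String) (out : Int) : Prop := out = trebuchet_alt noisyValues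
instance (noisyValues : List String) (out : Int) : Decidable (Spec_trebuchet noisyValues out) := by unfold Spec_trebuchet; infer_instance

-- ===== CLAIM (what is proved, stated in full; the proofs are below) =====
def Claim_equal_trebuchet : Prop := ∀ (noisyValues : List String), Dom_trebuchet noisyValues → Pre_trebuchet noisyValues → Spec_trebuchet noisyValues (trebuchet noisyValues)

-- ===== LEMMAS AND PROOFS =====

-- the token-or-none view of a finished walk, as the loop consumes it
def projW (p : Option Int × Nat) : Option (Int × Nat) :=
  match p with
  | (some v, k) => some (v, k)
  | (none, _) => none

theorem noMatch_9 (cs : List Char) (h0 : (['e'].isPrefixOf cs) = false) :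
    (walkT 9 cs).1 = none := by
  cases cs with
  | nil => rfl
  | cons c rest =>
    by_cases hc0 : c = 'e'
    · subst hc0; exact absurd h0 (by simp)
    · have hb0 : (c == 'e') = false := by simpa using hc0
      simp [walkT, trieChild, trieVal, trieNodes, List.lookup, hb0]

theorem noMatch_23 (cs : List Char) (h0 : (['n'].isPrefixOf cs) = false) :
    (walkT 23 cs).1 = none := by
  cases cs with
  | nil => rfl
  | cons c rest =>
    by_cases hc0 : c = 'n'
    · subst hc0; exact absurd h0 (by simp)
    · have hb0 : (c == 'n') = false := by simpa using hc0
      simp [walkT, trieChild, trieVal, trieNodes, List.lookup, hb0]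

theorem noMatch_28 (cs : List Char) (h0 : (['t'].isPrefixOf cs) = false) :
    (walkT 28 cs).1 = none := by
  cases cs with
  | nil => rfl
  | cons c rest =>
    by_cases hc0 : c = 't'
    · subst hc0; exact absurd h0 (by simp)
    · have hb0 : (c == 't') = false := by simpa using hc0
      simp [walkT, trieChild, trieVal, trieNodes, List.lookup, hb0]

theorem noMatch_8 (cs : List Char) (h0 : (['e', 'e'].isPrefixOf cs) = false) :
    (walkT 8 cs).1 = none := by
  cases cs with
  | nil => rfl
  | cons c rest =>
    by_cases hc0 : c = 'e'
    · subst hc0; exact noMatch_9 rest (by simpa using h0)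
    · have hb0 : (c == 'e') = false := by simpa using hc0
      simp [walkT, trieChild, trieVal, trieNodes, List.lookup, hb0]

theorem noMatch_13 (cs : List Char) (h0 : (['r'].isPrefixOf cs) = false) :
    (walkT 13 cs).1 = none := by
  cases cs with
  | nil => rfl
  | cons c rest =>
    by_cases hc0 : c = 'r'
    · subst hc0; exact absurd h0 (by simp)
    · have hb0 : (c == 'r') = false := by simpa using hc0
      simp [walkT, trieChild, trieVal, trieNodes, List.lookup, hb0]

theorem noMatch_16 (cs : List Char) (h0 : (['e'].isPrefixOf cs) = false) :
    (walkT 16 cs).1 = none := by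
  cases cs with
  | nil => rfl
  | cons c rest =>
    by_cases hc0 : c = 'e'
    · subst hc0; exact absurd h0 (by simp)
    · have hb0 : (c == 'e') = false := by simpa using hc0
      simp [walkT, trieChild, trieVal, trieNodes, List.lookup, hb0]

theorem noMatch_22 (cs : List Char) (h0 : (['e', 'n'].isPrefixOf cs) = false) :
    (walkT 22 cs).1 = none := by
  cases cs with
  | nil => rfl
  | cons c rest =>
    by_cases hc0 : c = 'e'
    · subst hc0; exact noMatch_23 rest (by simpa using h0)
    · have hb0 : (c == 'e') = false := by simpa using hc0
      simp [walkT, trieChild, trieVal, trieNodes, List.lookup, hb0]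

theorem noMatch_27 (cs : List Char) (h0 : (['h', 't'].isPrefixOf cs) = false) :
    (walkT 27 cs).1 = none := by
  cases cs with
  | nil => rfl
  | cons c rest =>
    by_cases hc0 : c = 'h'
    · subst hc0; exact noMatch_28 rest (by simpa using h0)
    · have hb0 : (c == 'h') = false := by simpa using hc0
      simp [walkT, trieChild, trieVal, trieNodes, List.lookup, hb0]

theorem noMatch_32 (cs : List Char) (h0 : (['e'].isPrefixOf cs) = false) :
    (walkT 32 cs).1 = none := by
  cases cs with
  | nil => rfl
  | cons c rest =>
    by_cases hc0 : c = 'e'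
    · subst hc0; exact absurd h0 (by simp)
    · have hb0 : (c == 'e') = false := by simpa using hc0
      simp [walkT, trieChild, trieVal, trieNodes, List.lookup, hb0]

theorem noMatch_2 (cs : List Char) (h0 : (['e'].isPrefixOf cs) = false) :
    (walkT 2 cs).1 = none := by
  cases cs with
  | nil => rfl
  | cons c rest =>
    by_cases hc0 : c = 'e'
    · subst hc0; exact absurd h0 (by simp)
    · have hb0 : (c == 'e') = false := by simpa using hc0
      simp [walkT, trieChild, trieVal, trieNodes, List.lookup, hb0]

theorem noMatch_5 (cs : List Char) (h0 : (['o'].isPrefixOf cs) = false) :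
    (walkT 5 cs).1 = none := by
  cases cs with
  | nil => rfl
  | cons c rest =>
    by_cases hc0 : c = 'o'
    · subst hc0; exact absurd h0 (by simp)
    · have hb0 : (c == 'o') = false := by simpa using hc0
      simp [walkT, trieChild, trieVal, trieNodes, List.lookup, hb0]

theorem noMatch_7 (cs : List Char) (h0 : (['r', 'e', 'e'].isPrefixOf cs) = false) :
    (walkT 7 cs).1 = none := by
  cases cs with
  | nil => rfl
  | cons c rest =>
    by_cases hc0 : c = 'r'
    · subst hc0; exact noMatch_8 rest (by simpa using h0)
    · have hb0 : (c == 'r') = false := by simpa using hc0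
      simp [walkT, trieChild, trieVal, trieNodes, List.lookup, hb0]

theorem noMatch_12 (cs : List Char) (h0 : (['u', 'r'].isPrefixOf cs) = false) :
    (walkT 12 cs).1 = none := by
  cases cs with
  | nil => rfl
  | cons c rest =>
    by_cases hc0 : c = 'u'
    · subst hc0; exact noMatch_13 rest (by simpa using h0)
    · have hb0 : (c == 'u') = false := by simpa using hc0
      simp [walkT, trieChild, trieVal, trieNodes, List.lookup, hb0]

theorem noMatch_15 (cs : List Char) (h0 : (['v', 'e'].isPrefixOf cs) = false) :
    (walkT 15 cs).1 = none := by
  cases cs with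
  | nil => rfl
  | cons c rest =>
    by_cases hc0 : c = 'v'
    · subst hc0; exact noMatch_16 rest (by simpa using h0)
    · have hb0 : (c == 'v') = false := by simpa using hc0
      simp [walkT, trieChild, trieVal, trieNodes, List.lookup, hb0]

theorem noMatch_19 (cs : List Char) (h0 : (['x'].isPrefixOf cs) = false) :
    (walkT 19 cs).1 = none := by
  cases cs with
  | nil => rfl
  | cons c rest =>
    by_cases hc0 : c = 'x'
    · subst hc0; exact absurd h0 (by simp)
    · have hb0 : (c == 'x') = false := by simpa using hc0
      simp [walkT, trieChild, trieVal, trieNodes, List.lookup, hb0]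

theorem noMatch_21 (cs : List Char) (h0 : (['v', 'e', 'n'].isPrefixOf cs) = false) :
    (walkT 21 cs).1 = none := by
  cases cs with
  | nil => rfl
  | cons c rest =>
    by_cases hc0 : c = 'v'
    · subst hc0; exact noMatch_22 rest (by simpa using h0)
    · have hb0 : (c == 'v') = false := by simpa using hc0
      simp [walkT, trieChild, trieVal, trieNodes, List.lookup, hb0]

theorem noMatch_26 (cs : List Char) (h0 : (['g', 'h', 't'].isPrefixOf cs) = false) :
    (walkT 26 cs).1 = none := by
  cases cs with
  | nil => rfl
  | cons c rest =>
    by_cases hc0 : c = 'g'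
    · subst hc0; exact noMatch_27 rest (by simpa using h0)
    · have hb0 : (c == 'g') = false := by simpa using hc0
      simp [walkT, trieChild, trieVal, trieNodes, List.lookup, hb0]

theorem noMatch_31 (cs : List Char) (h0 : (['n', 'e'].isPrefixOf cs) = false) :
    (walkT 31 cs).1 = none := by
  cases cs with
  | nil => rfl
  | cons c rest =>
    by_cases hc0 : c = 'n'
    · subst hc0; exact noMatch_32 rest (by simpa using h0)
    · have hb0 : (c == 'n') = false := by simpa using hc0
      simp [walkT, trieChild, trieVal, trieNodes, List.lookup, hb0]

theorem noMatch_1 (cs : List Char) (h0 : (['n', 'e'].isPrefixOf cs) = false) :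
    (walkT 1 cs).1 = none := by
  cases cs with
  | nil => rfl
  | cons c rest =>
    by_cases hc0 : c = 'n'
    · subst hc0; exact noMatch_2 rest (by simpa using h0)
    · have hb0 : (c == 'n') = false := by simpa using hc0
      simp [walkT, trieChild, trieVal, trieNodes, List.lookup, hb0]

theorem noMatch_4 (cs : List Char) (h0 : (['w', 'o'].isPrefixOf cs) = false) (h1 : (['h', 'r', 'e', 'e'].isPrefixOf cs) = false) :
    (walkT 4 cs).1 = none := by
  cases cs with
  | nil => rfl
  | cons c rest =>
    by_cases hc0 : c = 'w'
    · subst hc0; exact noMatch_5 rest (by simpa using h0)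
    by_cases hc1 : c = 'h'
    · subst hc1; exact noMatch_7 rest (by simpa using h1)
    · have hb0 : (c == 'w') = false := by simpa using hc0
      have hb1 : (c == 'h') = false := by simpa using hc1
      simp [walkT, trieChild, trieVal, trieNodes, List.lookup, hb0, hb1]

theorem noMatch_11 (cs : List Char) (h0 : (['o', 'u', 'r'].isPrefixOf cs) = false) (h1 : (['i', 'v', 'e'].isPrefixOf cs) = false) :
    (walkT 11 cs).1 = none := by
  cases cs with
  | nil => rfl
  | cons c rest =>
    by_cases hc0 : c = 'o'
    · subst hc0; exact noMatch_12 rest (by simpa using h0)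
    by_cases hc1 : c = 'i'
    · subst hc1; exact noMatch_15 rest (by simpa using h1)
    · have hb0 : (c == 'o') = false := by simpa using hc0
      have hb1 : (c == 'i') = false := by simpa using hc1
      simp [walkT, trieChild, trieVal, trieNodes, List.lookup, hb0, hb1]

theorem noMatch_18 (cs : List Char) (h0 : (['i', 'x'].isPrefixOf cs) = false) (h1 : (['e', 'v', 'e', 'n'].isPrefixOf cs) = false) :
    (walkT 18 cs).1 = none := by
  cases cs with
  | nil => rfl
  | cons c rest =>
    by_cases hc0 : c = 'i'
    · subst hc0; exact noMatch_19 rest (by simpa using h0)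
    by_cases hc1 : c = 'e'
    · subst hc1; exact noMatch_21 rest (by simpa using h1)
    · have hb0 : (c == 'i') = false := by simpa using hc0
      have hb1 : (c == 'e') = false := by simpa using hc1
      simp [walkT, trieChild, trieVal, trieNodes, List.lookup, hb0, hb1]

theorem noMatch_25 (cs : List Char) (h0 : (['i', 'g', 'h', 't'].isPrefixOf cs) = false) :
    (walkT 25 cs).1 = none := by
  cases cs with
  | nil => rfl
  | cons c rest =>
    by_cases hc0 : c = 'i'
    · subst hc0; exact noMatch_26 rest (by simpa using h0)
    · have hb0 : (c == 'i') = false := by simpa using hc0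
      simp [walkT, trieChild, trieVal, trieNodes, List.lookup, hb0]

theorem noMatch_30 (cs : List Char) (h0 : (['i', 'n', 'e'].isPrefixOf cs) = false) :
    (walkT 30 cs).1 = none := by
  cases cs with
  | nil => rfl
  | cons c rest =>
    by_cases hc0 : c = 'i'
    · subst hc0; exact noMatch_31 rest (by simpa using h0)
    · have hb0 : (c == 'i') = false := by simpa using hc0
      simp [walkT, trieChild, trieVal, trieNodes, List.lookup, hb0]

theorem noMatch_0 (cs : List Char) (h0 : (['o', 'n', 'e'].isPrefixOf cs) = false) (h1 : (['t', 'w', 'o'].isPrefixOf cs) = false) (h2 : (['t', 'h', 'r', 'e', 'e'].isPrefixOf cs) = false) (h3 : (['f', 'o', 'u', 'r'].isPrefixOf cs) = false) (h4 : (['f', 'i', 'v', 'e'].isPrefixOf cs) = false) (h5 : (['s', 'i', 'x'].isPrefixOf cs) = false) (h6 : (['s', 'e', 'v', 'e', 'n'].isPrefixOf cs) = false) (h7 : (['e', 'i', 'g', 'h', 't'].isPrefixOf cs) = false) (h8 : (['n', 'i', 'n', 'e'].isPrefixOf cs) = false) (h9 : (['1'].isPrefixOf cs) = false) (h10 : (['2'].isPrefixOf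 cs) = false) (h11 : (['3'].isPrefixOf cs) = false) (h12 : (['4'].isPrefixOf cs) = false) (h13 : (['5'].isPrefixOf cs) = false) (h14 : (['6'].isPrefixOf cs) = false) (h15 : (['7'].isPrefixOf cs) = false) (h16 : (['8'].isPrefixOf cs) = false) (h17 : (['9'].isPrefixOf cs) = false) :
    (walkT 0 cs).1 = none := by
  cases cs with
  | nil => rfl
  | cons c rest =>
    by_cases hc0 : c = 'o'
    · subst hc0; exact noMatch_1 rest (by simpa using h0)
    by_cases hc1 : c = 't'
    · subst hc1; exact noMatch_4 rest (by simpa using h1) (by simpa using h2)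
    by_cases hc2 : c = 'f'
    · subst hc2; exact noMatch_11 rest (by simpa using h3) (by simpa using h4)
    by_cases hc3 : c = 's'
    · subst hc3; exact noMatch_18 rest (by simpa using h5) (by simpa using h6)
    by_cases hc4 : c = 'e'
    · subst hc4; exact noMatch_25 rest (by simpa using h7)
    by_cases hc5 : c = 'n'
    · subst hc5; exact noMatch_30 rest (by simpa using h8)
    by_cases hc6 : c = '1'
    · subst hc6; exact absurd h9 (by simp)
    by_cases hc7 : c = '2'
    · subst hc7; exact absurd h10 (by simp)
    by_cases hc8 : c = '3'
    · subst hc8; exact absurd h11 (by simp)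
    by_cases hc9 : c = '4'
    · subst hc9; exact absurd h12 (by simp)
    by_cases hc10 : c = '5'
    · subst hc10; exact absurd h13 (by simp)
    by_cases hc11 : c = '6'
    · subst hc11; exact absurd h14 (by simp)
    by_cases hc12 : c = '7'
    · subst hc12; exact absurd h15 (by simp)
    by_cases hc13 : c = '8'
    · subst hc13; exact absurd h16 (by simp)
    by_cases hc14 : c = '9'
    · subst hc14; exact absurd h17 (by simp)
    · have hb0 : (c == 'o') = false := by simpa using hc0
      have hb1 : (c == 't') = false := by simpa using hc1
      have hb2 : (c == 'f') = false := by simpa using hc2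
      have hb3 : (c == 's') = false := by simpa using hc3
      have hb4 : (c == 'e') = false := by simpa using hc4
      have hb5 : (c == 'n') = false := by simpa using hc5
      have hb6 : (c == '1') = false := by simpa using hc6
      have hb7 : (c == '2') = false := by simpa using hc7
      have hb8 : (c == '3') = false := by simpa using hc8
      have hb9 : (c == '4') = false := by simpa using hc9
      have hb10 : (c == '5') = false := by simpa using hc10
      have hb11 : (c == '6') = false := by simpa using hc11
      have hb12 : (c == '7') = false := by simpa using hc12
      have hb13 : (c == '8') = false := by simpa using hc13
      have hb14 : (c == '9') = false := by simpa using hc14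
      simp [walkT, trieChild, trieVal, trieNodes, List.lookup, hb0, hb1, hb2, hb3, hb4, hb5, hb6, hb7, hb8, hb9, hb10, hb11, hb12, hb13, hb14]


theorem hitB_one (rest : List Char) : projW (walkT 0 (['o', 'n', 'e'] ++ rest)) = some (1, 3) := by
  cases rest <;> rfl

theorem hitA_one (rest : List Char) : scanKeysA keysA (['o', 'n', 'e'] ++ rest) = some (1, 3) := by
  cases rest <;> rfl

theorem hitB_two (rest : List Char) : projW (walkT 0 (['t', 'w', 'o'] ++ rest)) = some (2, 3) := by
  cases rest <;> rfl

theorem hitA_two (rest : List Char) : scanKeysA keysA (['t', 'w', 'o'] ++ rest) = some (2, 3) := by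
  cases rest <;> rfl

theorem hitB_three (rest : List Char) : projW (walkT 0 (['t', 'h', 'r', 'e', 'e'] ++ rest)) = some (3, 5) := by
  cases rest <;> rfl

theorem hitA_three (rest : List Char) : scanKeysA keysA (['t', 'h', 'r', 'e', 'e'] ++ rest) = some (3, 5) := by
  cases rest <;> rfl

theorem hitB_four (rest : List Char) : projW (walkT 0 (['f', 'o', 'u', 'r'] ++ rest)) = some (4, 4) := by
  cases rest <;> rfl

theorem hitA_four (rest : List Char) : scanKeysA keysA (['f', 'o', 'u', 'r'] ++ rest) = some (4, 4) := by
  cases rest <;> rfl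

theorem hitB_five (rest : List Char) : projW (walkT 0 (['f', 'i', 'v', 'e'] ++ rest)) = some (5, 4) := by
  cases rest <;> rfl

theorem hitA_five (rest : List Char) : scanKeysA keysA (['f', 'i', 'v', 'e'] ++ rest) = some (5, 4) := by
  cases rest <;> rfl

theorem hitB_six (rest : List Char) : projW (walkT 0 (['s', 'i', 'x'] ++ rest)) = some (6, 3) := by
  cases rest <;> rfl

theorem hitA_six (rest : List Char) : scanKeysA keysA (['s', 'i', 'x'] ++ rest) = some (6, 3) := by
  cases rest <;> rfl

theorem hitB_seven (rest : List Char) : projW (walkT 0 (['s', 'e', 'v', 'e', 'n'] ++ rest)) = some (7, 5) := by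
  cases rest <;> rfl

theorem hitA_seven (rest : List Char) : scanKeysA keysA (['s', 'e', 'v', 'e', 'n'] ++ rest) = some (7, 5) := by
  cases rest <;> rfl

theorem hitB_eight (rest : List Char) : projW (walkT 0 (['e', 'i', 'g', 'h', 't'] ++ rest)) = some (8, 5) := by
  cases rest <;> rfl

theorem hitA_eight (rest : List Char) : scanKeysA keysA (['e', 'i', 'g', 'h', 't'] ++ rest) = some (8, 5) := by
  cases rest <;> rfl

theorem hitB_nine (rest : List Char) : projW (walkT 0 (['n', 'i', 'n', 'e'] ++ rest)) = some (9, 4) := by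
  cases rest <;> rfl

theorem hitA_nine (rest : List Char) : scanKeysA keysA (['n', 'i', 'n', 'e'] ++ rest) = some (9, 4) := by
  cases rest <;> rfl

theorem hitB_d1 (rest : List Char) : projW (walkT 0 (['1'] ++ rest)) = some (1, 1) := by
  cases rest <;> rfl

theorem hitA_d1 (rest : List Char) : scanKeysA keysA (['1'] ++ rest) = some (1, 1) := by
  cases rest <;> rfl

theorem hitB_d2 (rest : List Char) : projW (walkT 0 (['2'] ++ rest)) = some (2, 1) := by
  cases rest <;> rfl

theorem hitA_d2 (rest : List Char) : scanKeysA keysA (['2'] ++ rest) = some (2, 1) := by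
  cases rest <;> rfl

theorem hitB_d3 (rest : List Char) : projW (walkT 0 (['3'] ++ rest)) = some (3, 1) := by
  cases rest <;> rfl

theorem hitA_d3 (rest : List Char) : scanKeysA keysA (['3'] ++ rest) = some (3, 1) := by
  cases rest <;> rfl

theorem hitB_d4 (rest : List Char) : projW (walkT 0 (['4'] ++ rest)) = some (4, 1) := by
  cases rest <;> rfl

theorem hitA_d4 (rest : List Char) : scanKeysA keysA (['4'] ++ rest) = some (4, 1) := by
  cases rest <;> rfl

theorem hitB_d5 (rest : List Char) : projW (walkT 0 (['5'] ++ rest)) = some (5, 1) := by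
  cases rest <;> rfl

theorem hitA_d5 (rest : List Char) : scanKeysA keysA (['5'] ++ rest) = some (5, 1) := by
  cases rest <;> rfl

theorem hitB_d6 (rest : List Char) : projW (walkT 0 (['6'] ++ rest)) = some (6, 1) := by
  cases rest <;> rfl

theorem hitA_d6 (rest : List Char) : scanKeysA keysA (['6'] ++ rest) = some (6, 1) := by
  cases rest <;> rfl

theorem hitB_d7 (rest : List Char) : projW (walkT 0 (['7'] ++ rest)) = some (7, 1) := by
  cases rest <;> rfl

theorem hitA_d7 (rest : List Char) : scanKeysA keysA (['7'] ++ rest) = some (7, 1) := by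
  cases rest <;> rfl

theorem hitB_d8 (rest : List Char) : projW (walkT 0 (['8'] ++ rest)) = some (8, 1) := by
  cases rest <;> rfl

theorem hitA_d8 (rest : List Char) : scanKeysA keysA (['8'] ++ rest) = some (8, 1) := by
  cases rest <;> rfl

theorem hitB_d9 (rest : List Char) : projW (walkT 0 (['9'] ++ rest)) = some (9, 1) := by
  cases rest <;> rfl

theorem hitA_d9 (rest : List Char) : scanKeysA keysA (['9'] ++ rest) = some (9, 1) := by
  cases rest <;> rfl

theorem scan_eq (cs : List Char) : projW (walkT 0 cs) = scanKeysA keysA cs := by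
  by_cases h0 : ['o', 'n', 'e'].isPrefixOf cs
  · obtain ⟨rest, rfl⟩ := List.isPrefixOf_iff_prefix.mp h0
    exact (hitB_one rest).trans (hitA_one rest).symm
  by_cases h1 : ['t', 'w', 'o'].isPrefixOf cs
  · obtain ⟨rest, rfl⟩ := List.isPrefixOf_iff_prefix.mp h1
    exact (hitB_two rest).trans (hitA_two rest).symm
  by_cases h2 : ['t', 'h', 'r', 'e', 'e'].isPrefixOf cs
  · obtain ⟨rest, rfl⟩ := List.isPrefixOf_iff_prefix.mp h2
    exact (hitB_three rest).trans (hitA_three rest).symm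
  by_cases h3 : ['f', 'o', 'u', 'r'].isPrefixOf cs
  · obtain ⟨rest, rfl⟩ := List.isPrefixOf_iff_prefix.mp h3
    exact (hitB_four rest).trans (hitA_four rest).symm
  by_cases h4 : ['f', 'i', 'v', 'e'].isPrefixOf cs
  · obtain ⟨rest, rfl⟩ := List.isPrefixOf_iff_prefix.mp h4
    exact (hitB_five rest).trans (hitA_five rest).symm
  by_cases h5 : ['s', 'i', 'x'].isPrefixOf cs
  · obtain ⟨rest, rfl⟩ := List.isPrefixOf_iff_prefix.mp h5
    exact (hitB_six rest).trans (hitA_six rest).symm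
  by_cases h6 : ['s', 'e', 'v', 'e', 'n'].isPrefixOf cs
  · obtain ⟨rest, rfl⟩ := List.isPrefixOf_iff_prefix.mp h6
    exact (hitB_seven rest).trans (hitA_seven rest).symm
  by_cases h7 : ['e', 'i', 'g', 'h', 't'].isPrefixOf cs
  · obtain ⟨rest, rfl⟩ := List.isPrefixOf_iff_prefix.mp h7
    exact (hitB_eight rest).trans (hitA_eight rest).symm
  by_cases h8 : ['n', 'i', 'n', 'e'].isPrefixOf cs
  · obtain ⟨rest, rfl⟩ := List.isPrefixOf_iff_prefix.mp h8
    exact (hitB_nine rest).trans (hitA_nine rest).symm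
  by_cases h9 : ['1'].isPrefixOf cs
  · obtain ⟨rest, rfl⟩ := List.isPrefixOf_iff_prefix.mp h9
    exact (hitB_d1 rest).trans (hitA_d1 rest).symm
  by_cases h10 : ['2'].isPrefixOf cs
  · obtain ⟨rest, rfl⟩ := List.isPrefixOf_iff_prefix.mp h10
    exact (hitB_d2 rest).trans (hitA_d2 rest).symm
  by_cases h11 : ['3'].isPrefixOf cs
  · obtain ⟨rest, rfl⟩ := List.isPrefixOf_iff_prefix.mp h11
    exact (hitB_d3 rest).trans (hitA_d3 rest).symm
  by_cases h12 : ['4'].isPrefixOf cs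
  · obtain ⟨rest, rfl⟩ := List.isPrefixOf_iff_prefix.mp h12
    exact (hitB_d4 rest).trans (hitA_d4 rest).symm
  by_cases h13 : ['5'].isPrefixOf cs
  · obtain ⟨rest, rfl⟩ := List.isPrefixOf_iff_prefix.mp h13
    exact (hitB_d5 rest).trans (hitA_d5 rest).symm
  by_cases h14 : ['6'].isPrefixOf cs
  · obtain ⟨rest, rfl⟩ := List.isPrefixOf_iff_prefix.mp h14
    exact (hitB_d6 rest).trans (hitA_d6 rest).symm
  by_cases h15 : ['7'].isPrefixOf cs
  · obtain ⟨rest, rfl⟩ := List.isPrefixOf_iff_prefix.mp h15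
    exact (hitB_d7 rest).trans (hitA_d7 rest).symm
  by_cases h16 : ['8'].isPrefixOf cs
  · obtain ⟨rest, rfl⟩ := List.isPrefixOf_iff_prefix.mp h16
    exact (hitB_d8 rest).trans (hitA_d8 rest).symm
  by_cases h17 : ['9'].isPrefixOf cs
  · obtain ⟨rest, rfl⟩ := List.isPrefixOf_iff_prefix.mp h17
    exact (hitB_d9 rest).trans (hitA_d9 rest).symm
  have g0 : (['o', 'n', 'e'].isPrefixOf cs) = false := Bool.eq_false_iff.mpr h0
  have g1 : (['t', 'w', 'o'].isPrefixOf cs) = false := Bool.eq_false_iff.mpr h1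
  have g2 : (['t', 'h', 'r', 'e', 'e'].isPrefixOf cs) = false := Bool.eq_false_iff.mpr h2
  have g3 : (['f', 'o', 'u', 'r'].isPrefixOf cs) = false := Bool.eq_false_iff.mpr h3
  have g4 : (['f', 'i', 'v', 'e'].isPrefixOf cs) = false := Bool.eq_false_iff.mpr h4
  have g5 : (['s', 'i', 'x'].isPrefixOf cs) = false := Bool.eq_false_iff.mpr h5
  have g6 : (['s', 'e', 'v', 'e', 'n'].isPrefixOf cs) = false := Bool.eq_false_iff.mpr h6
  have g7 : (['e', 'i', 'g', 'h', 't'].isPrefixOf cs) = false := Bool.eq_false_iff.mpr h7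
  have g8 : (['n', 'i', 'n', 'e'].isPrefixOf cs) = false := Bool.eq_false_iff.mpr h8
  have g9 : (['1'].isPrefixOf cs) = false := Bool.eq_false_iff.mpr h9
  have g10 : (['2'].isPrefixOf cs) = false := Bool.eq_false_iff.mpr h10
  have g11 : (['3'].isPrefixOf cs) = false := Bool.eq_false_iff.mpr h11
  have g12 : (['4'].isPrefixOf cs) = false := Bool.eq_false_iff.mpr h12
  have g13 : (['5'].isPrefixOf cs) = false := Bool.eq_false_iff.mpr h13
  have g14 : (['6'].isPrefixOf cs) = false := Bool.eq_false_iff.mpr h14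
  have g15 : (['7'].isPrefixOf cs) = false := Bool.eq_false_iff.mpr h15
  have g16 : (['8'].isPrefixOf cs) = false := Bool.eq_false_iff.mpr h16
  have g17 : (['9'].isPrefixOf cs) = false := Bool.eq_false_iff.mpr h17
  rcases hw : walkT 0 cs with ⟨v, k⟩
  have hv : v = none := by have := noMatch_0 cs g0 g1 g2 g3 g4 g5 g6 g7 g8 g9 g10 g11 g12 g13 g14 g15 g16 g17; rw [hw] at this; exact this
  subst hv
  simp [projW, scanKeysA, keysA, g0, g1, g2, g3, g4, g5, g6, g7, g8, g9, g10, g11, g12, g13, g14, g15, g16, g17]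


-- accumulator lemma for A's loop
theorem loopA_acc (fuel : Nat) : ∀ (cs : List Char) (values : List Int),
    loopA fuel cs values = values ++ loopA fuel cs [] := by
  induction fuel with
  | zero => intro cs values; simp [loopA]
  | succ n ih =>
    intro cs values
    cases cs with
    | nil => simp [loopA]
    | cons c rest =>
      simp only [loopA]
      cases hm : scanKeysA keysA (c :: rest) with
      | none => exact ih rest values
      | some vk =>
        obtain ⟨v, k⟩ := vk
        dsimp only
        rw [ih _ (values ++ [v]), ih _ ([] ++ [v])]
        simp

theorem getLast?_cons_orElse (v : Int) (T : List Int) (last : Option Int) :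
    ((v :: T).getLast?.orElse fun _ => last) = (T.getLast?.orElse fun _ => some v) := by
  cases T with
  | nil => rfl
  | cons t ts =>
    rw [List.getLast?_cons_cons]
    cases hx : (t :: ts).getLast? with
    | none =>
      exact absurd (List.getLast?_isSome.mpr (List.cons_ne_nil t ts)) (by rw [hx]; simp)
    | some x => rfl

-- B's loop computes exactly the head and the last of A's token list
theorem loopB_eq (fuel : Nat) : ∀ (cs : List Char) (first last : Option Int),
    loopB fuel cs first last =
      ((first.orElse fun _ => (loopA fuel cs []).head?),
       ((loopA fuel cs []).getLast?.orElse fun _ => last)) := by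
  induction fuel with
  | zero => intro cs first last; cases first <;> cases last <;> simp [loopA, loopB, Option.orElse]
  | succ n ih =>
    intro cs first last
    cases cs with
    | nil => cases first <;> cases last <;> simp [loopA, loopB, Option.orElse]
    | cons c rest =>
      have hs := scan_eq (c :: rest)
      rcases hw : walkT 0 (c :: rest) with ⟨v, k⟩
      rw [hw] at hs
      simp only [loopB, loopA, hw, ← hs]
      cases v with
      | none =>
        simp only [projW]
        exact ih rest first last
      | some v' =>
        simp only [projW]
        rw [ih, loopA_acc n _ ([] ++ [v'])]
        simp only [List.nil_append, List.cons_append, List.head?_cons]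
        rw [getLast?_cons_orElse]
        cases first <;> simp [Option.orElse]

theorem pyGet?_zero_head (xs : List Int) : PySem.List.pyGet? xs 0 = xs.head? := by
  rw [show (0:Int) = ((0:Nat):Int) by norm_num, PySem.List.pyGet?_natCast]
  cases xs <;> simp

-- per-string agreement of the two summands
theorem perString (total : Int) (s : String) :
    (total + (PySem.List.pyGet? (loopA s.toList.length s.toList []) 0).getD 0 * 10
           + (PySem.List.pyGet? (loopA s.toList.length s.toList []) (-1)).getD 0)
    = (total + (loopB s.toList.length s.toList none none).1.getD 0 * 10
             + (loopB s.toList.length s.toList none none).2.getD 0) := by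
  rw [loopB_eq, pyGet?_zero_head, PySem.List.pyGet?_neg_one]
  cases h : (loopA s.toList.length s.toList []).getLast? <;>
    simp [Option.orElse]

-- ===== VERDICT (by name: the statement is the Claim_ definition above) =====
theorem trebuchet_spec : Claim_equal_trebuchet := by
  intro noisyValues _ _
  unfold Spec_trebuchet trebuchet trebuchet_alt
  congr 1
  funext total s
  exact perString total s
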